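-- pv_equiv track=rewrite | github.com/Dhyani2206/sec-regulatory-rag | src/rag/evaluation/batch_evaluation_runner.py | build_scope_list
-- ===== SOURCE A (Python) =====
-- from typing import Dict, Any, List
--
-- def build_scope_list(catalog: Dict[str, Dict[str, List[str]]]) -> List[Dict[str, str]]:
--     scopes = []
--     for company in sorted(catalog.keys()):
--         for form_folder in sorted(catalog[company].keys()):
--             for year in sorted(catalog[company][form_folder]):
--                 scopes.append({
--                     "company": company,
--                     "form_folder": form_folder,
--                     "year": str(year),
--                 })
--     return scopes
-- ===== SOURCE B (Python) =====
-- def build_scope_list(catalog):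
--     # Different decomposition: flatten everything into triples first,
--     # then ONE global lexicographic sort reproduces the nested ordering.
--     triples = [(company, form_folder, year)
--                for company, forms in catalog.items()
--                for form_folder, years in forms.items()
--                for year in years]
--     return [{"company": c, "form_folder": f, "year": str(y)}
--             for c, f, y in sorted(triples)]
-- ===== Notes on version B (the rewrite author's own statement) =====
-- stated objective: alternative
-- what changed: B replaces A's three nested per-level sorts (companies, then form folders, then years) by flattening the whole catalog into (company, form_folder, year) triples in one pass and performing a single global lexicographic sort, then mapping each triple to its dict; Pre_ only excludes association lists with duplicate company or form-folder keys, which cannot occur as a Python dict.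
import Mathlib
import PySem

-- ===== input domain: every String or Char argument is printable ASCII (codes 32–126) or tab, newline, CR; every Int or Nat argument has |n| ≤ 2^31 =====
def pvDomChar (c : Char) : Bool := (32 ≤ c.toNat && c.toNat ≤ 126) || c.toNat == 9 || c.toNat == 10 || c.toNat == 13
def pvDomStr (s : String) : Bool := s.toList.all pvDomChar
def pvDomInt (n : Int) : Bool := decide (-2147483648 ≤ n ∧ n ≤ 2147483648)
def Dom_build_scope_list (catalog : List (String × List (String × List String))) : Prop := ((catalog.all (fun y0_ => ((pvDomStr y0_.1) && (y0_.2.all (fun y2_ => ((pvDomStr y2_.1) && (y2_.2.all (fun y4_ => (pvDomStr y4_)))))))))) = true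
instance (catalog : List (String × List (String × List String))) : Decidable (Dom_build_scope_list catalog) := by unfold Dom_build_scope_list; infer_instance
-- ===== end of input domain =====

-- B flattens the catalog into (company, form_folder, year) triples and does ONE global
-- lexicographic sort instead of A's three nested per-level sorts; same result, same cost.


-- ===== PORT A =====
-- dict lookup on an association list: first matching key (Python's dict [] on the items list)
def pyGetD {α : Type} (xs : List (String × α)) (k : String) (d : α) : α :=
  match xs with
  | [] => d
  | (k', v) :: t => if k' = k then v else pyGetD t k d

-- the dict {"company": …, "form_folder": …, "year": str(year)} (str(year) is the identity on str)
def mkScope (company form_folder year : String) : List (String × String) :=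
  [("company", company), ("form_folder", form_folder), ("year", year)]

def build_scope_list (catalog : List (String × List (String × List String))) : List (List (String × String)) :=
  (PySem.List.sorted (catalog.map (·.1)) (fun x => x) false).foldl (fun scopes company =>
    (PySem.List.sorted ((pyGetD catalog company []).map (·.1)) (fun x => x) false).foldl (fun scopes form_folder =>
      (PySem.List.sorted (pyGetD (pyGetD catalog company []) form_folder []) (fun x => x) false).foldl (fun scopes year =>
        scopes ++ [mkScope company form_folder year]) scopes) scopes) []

-- ===== PORT B =====
-- Python tuple comparison on (str, str, str) = lexicographic order, i.e. the Lex product order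
def tripleKey (t : String × String × String) : Lex (String × Lex (String × String)) :=
  toLex (t.1, toLex (t.2.1, t.2.2))

def build_scope_list_alt (catalog : List (String × List (String × List String))) : List (List (String × String)) :=
  let triples := catalog.flatMap (fun cp => cp.2.flatMap (fun fp => fp.2.map (fun y => (cp.1, fp.1, y))))
  (PySem.List.sorted triples tripleKey false).map (fun t => mkScope t.1 t.2.1 t.2.2)

-- ===== PRECONDITION & SPEC =====
-- Pre_ only excludes association lists with duplicate company keys or duplicate form-folder
-- keys inside one company: a Python dict cannot contain duplicate keys, so no Python input is excluded.
def Pre_build_scope_list (catalog : List (String × List (String × List String))) : Prop :=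
  (catalog.map (·.1)).Nodup ∧ ∀ p ∈ catalog, (p.2.map (·.1)).Nodup
instance (catalog : List (String × List (String × List String))) : Decidable (Pre_build_scope_list catalog) := by
  unfold Pre_build_scope_list; infer_instance

def pvWitness_build_scope_list : (List (String × List (String × List String))) :=
  [("b corp", [("10-K", ["2021", "2019"]), ("10-Q", ["2020"])]), ("a corp", [("8-K", ["2020", "2020"])])]

def Spec_build_scope_list (catalog : List (String × List (String × List String))) (out : List (List (String × String))) : Prop := out = build_scope_list_alt catalog
instance (catalog : List (String × List (String × List String))) (out : List (List (String × String))) : Decidable (Spec_build_scope_list catalog out) := by unfold Spec_build_scope_list; infer_instance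

-- ===== CLAIM (what is proved, stated in full; the proofs are below) =====
def Claim_equal_build_scope_list : Prop := ∀ (catalog : List (String × List (String × List String))), Dom_build_scope_list catalog → Pre_build_scope_list catalog → Spec_build_scope_list catalog (build_scope_list catalog)

-- ===== LEMMAS AND PROOFS =====

-- the nested-sorted triple list that A's loops enumerate
def nestedTriples (catalog : List (String × List (String × List String))) : List (String × String × String) :=
  (PySem.List.sorted (catalog.map (·.1)) (fun x => x) false).flatMap (fun c =>
    (PySem.List.sorted ((pyGetD catalog c []).map (·.1)) (fun x => x) false).flatMap (fun f =>
      (PySem.List.sorted (pyGetD (pyGetD catalog c []) f []) (fun x => x) false).map (fun y => (c, f, y))))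

def rawTriples (catalog : List (String × List (String × List String))) : List (String × String × String) :=
  catalog.flatMap (fun cp => cp.2.flatMap (fun fp => fp.2.map (fun y => (cp.1, fp.1, y))))

lemma tripleKey_injective : Function.Injective tripleKey := by
  intro a b h
  have h' := congrArg ofLex h
  simp only [tripleKey, ofLex_toLex, Prod.mk.injEq] at h'
  have h2 := congrArg ofLex h'.2
  simp only [ofLex_toLex, Prod.mk.injEq] at h2
  exact Prod.ext h'.1 (Prod.ext h2.1 h2.2)

lemma build_scope_list_eq_map_nested (catalog : List (String × List (String × List String))) :
    build_scope_list catalog = (nestedTriples catalog).map (fun t => mkScope t.1 t.2.1 t.2.2) := by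
  simp only [build_scope_list, nestedTriples, PySem.List.foldl_append_singleton_eq_map,
    PySem.List.foldl_append_eq_flatMap, List.map_flatMap, List.map_map, List.nil_append]
  rfl

lemma pyGetD_of_mem {α : Type} {l : List (String × α)} (h : (l.map (·.1)).Nodup)
    {p : String × α} (hp : p ∈ l) (d : α) : pyGetD l p.1 d = p.2 := by
  induction l with
  | nil => cases hp
  | cons q t ih =>
    simp only [List.map_cons, List.nodup_cons] at h
    rcases List.mem_cons.1 hp with rfl | hmem
    · simp [pyGetD]
    · have hne : q.1 ≠ p.1 := by
        intro he
        exact h.1 (he ▸ List.mem_map.2 ⟨p, hmem, rfl⟩)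
      simp only [pyGetD, if_neg hne]
      exact ih h.2 hmem

lemma nested_perm_raw (catalog : List (String × List (String × List String)))
    (h1 : (catalog.map (·.1)).Nodup) (h2 : ∀ p ∈ catalog, (p.2.map (·.1)).Nodup) :
    (nestedTriples catalog).Perm (rawTriples catalog) := by
  unfold nestedTriples rawTriples
  refine List.Perm.trans
    (List.Perm.flatMap_right _ (PySem.List.sorted_perm (catalog.map (·.1)) (fun x => x) false)) ?_
  rw [List.flatMap_map]
  refine List.Perm.trans (List.Perm.flatMap_left catalog (fun cp hcp => ?_)) (List.Perm.refl _)
  rw [pyGetD_of_mem h1 hcp]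
  refine List.Perm.trans
    (List.Perm.flatMap_right _ (PySem.List.sorted_perm (cp.2.map (·.1)) (fun x => x) false)) ?_
  rw [List.flatMap_map]
  refine List.Perm.flatMap_left cp.2 (fun fp hfp => ?_)
  rw [pyGetD_of_mem (h2 cp hcp) hfp]
  exact List.Perm.map _ (PySem.List.sorted_perm fp.2 (fun x => x) false)

lemma sorted_nodup_pairwise_lt (xs : List String) (h : xs.Nodup) :
    (PySem.List.sorted xs (fun x => x) false).Pairwise (· < ·) := by
  have hle := PySem.List.sorted_pairwise xs (fun x => x)
  have hnd : (PySem.List.sorted xs (fun x => x) false).Nodup :=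
    (PySem.List.sorted_perm xs (fun x => x) false).nodup_iff.2 h
  exact (hle.and hnd).imp (fun {a b} hab => lt_of_le_of_ne hab.1 hab.2)

-- Pairwise ≤ (in tripleKey order) of a flatMap whose blocks have strictly increasing first components
lemma pairwise_flatMap_fst {l : List String} (f : String → List (String × String × String))
    (hl : l.Pairwise (· < ·))
    (hfst : ∀ c ∈ l, ∀ t ∈ f c, t.1 = c)
    (hin : ∀ c ∈ l, (f c).Pairwise (fun a b => tripleKey a ≤ tripleKey b)) :
    (l.flatMap f).Pairwise (fun a b => tripleKey a ≤ tripleKey b) := by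
  induction l with
  | nil => simp
  | cons c t ih =>
    rw [List.flatMap_cons, List.pairwise_append]
    rcases List.pairwise_cons.1 hl with ⟨hct, ht⟩
    refine ⟨hin c (List.mem_cons_self ..), ih ht (fun c' hc' => hfst c' (List.mem_cons_of_mem _ hc'))
      (fun c' hc' => hin c' (List.mem_cons_of_mem _ hc')), fun a ha b hb => ?_⟩
    rcases List.mem_flatMap.1 hb with ⟨c', hc', hbc'⟩
    have ha1 : a.1 = c := hfst c (List.mem_cons_self ..) a ha
    have hb1 : b.1 = c' := hfst c' (List.mem_cons_of_mem _ hc') b hbc'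
    have : a.1 < b.1 := by rw [ha1, hb1]; exact hct c' hc'
    exact le_of_lt (Prod.Lex.lt_iff.2 (Or.inl this))

-- Pairwise ≤ of one company block: strictly increasing form folders, years sorted within a form
lemma pairwise_company_block (c : String) {fl : List String} (g : String → List String)
    (hfl : fl.Pairwise (· < ·)) :
    (fl.flatMap (fun f => (PySem.List.sorted (g f) (fun x => x) false).map (fun y => (c, f, y)))).Pairwise
      (fun a b => tripleKey a ≤ tripleKey b) := by
  induction fl with
  | nil => simp
  | cons f t ih =>
    rw [List.flatMap_cons, List.pairwise_append]
    rcases List.pairwise_cons.1 hfl with ⟨hft, ht⟩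
    refine ⟨?_, ih ht, fun a ha b hb => ?_⟩
    · have hys := PySem.List.sorted_pairwise (g f) (fun x => x)
      refine (List.pairwise_map.2 (hys.imp (fun {y y'} hyy => ?_)))
      exact Prod.Lex.le_iff.2 (Or.inr ⟨rfl, Prod.Lex.le_iff.2 (Or.inr ⟨rfl, hyy⟩)⟩)
    · rcases List.mem_map.1 ha with ⟨y, _, rfl⟩
      rcases List.mem_flatMap.1 hb with ⟨f', hf', hbf'⟩
      rcases List.mem_map.1 hbf' with ⟨y', _, rfl⟩
      exact le_of_lt (Prod.Lex.lt_iff.2 (Or.inr ⟨rfl, Prod.Lex.lt_iff.2 (Or.inl (hft f' hf'))⟩))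

lemma pairwise_nested (catalog : List (String × List (String × List String)))
    (h1 : (catalog.map (·.1)).Nodup) (h2 : ∀ p ∈ catalog, (p.2.map (·.1)).Nodup) :
    (nestedTriples catalog).Pairwise (fun a b => tripleKey a ≤ tripleKey b) := by
  unfold nestedTriples
  refine pairwise_flatMap_fst _ (sorted_nodup_pairwise_lt _ h1) ?_ ?_
  · intro c _ t ht
    rcases List.mem_flatMap.1 ht with ⟨f, _, htf⟩
    rcases List.mem_map.1 htf with ⟨y, _, rfl⟩
    rfl
  · intro c hc
    refine pairwise_company_block c _ (sorted_nodup_pairwise_lt _ ?_)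
    have hcmem : c ∈ catalog.map (·.1) := (PySem.List.mem_sorted _ _ _ _).1 hc
    obtain ⟨p, hp, hpc⟩ := List.mem_map.1 hcmem
    rw [← hpc, pyGetD_of_mem h1 hp]
    exact h2 p hp

lemma sorted_raw_eq_nested (catalog : List (String × List (String × List String)))
    (h1 : (catalog.map (·.1)).Nodup) (h2 : ∀ p ∈ catalog, (p.2.map (·.1)).Nodup) :
    PySem.List.sorted (rawTriples catalog) tripleKey false = nestedTriples catalog := by
  refine PySem.List.eq_of_perm_of_pairwise_le_of_injective tripleKey tripleKey_injective
    (List.Perm.trans (PySem.List.sorted_perm _ tripleKey false) (nested_perm_raw catalog h1 h2).symm)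
    (PySem.List.sorted_pairwise _ tripleKey) (pairwise_nested catalog h1 h2)

-- ===== VERDICT (by name: the statement is the Claim_ definition above) =====
theorem build_scope_list_spec : Claim_equal_build_scope_list := by
  intro catalog _ hpre
  unfold Spec_build_scope_list build_scope_list_alt
  rw [build_scope_list_eq_map_nested, ← sorted_raw_eq_nested catalog hpre.1 hpre.2]
  rfl
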